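-- pv_equiv track=rewrite | github.com/beamsjr/FluentAI | src/security/validators.py | validate_host
-- ===== SOURCE A (Python) =====
-- from typing import Optional, List, Pattern, Union
--
-- def validate_host(host: str, allowed_hosts: List[str]) -> bool:
--     """Check if a host is in the allowed list"""
--     for allowed_host in allowed_hosts:
--         if allowed_host.startswith('*.'):
--             # Wildcard domain
--             suffix = allowed_host[2:]
--             if host.endswith(suffix):
--                 return True
--         elif host == allowed_host:
--             return True
--
--     return False
-- ===== SOURCE B (Python) =====
-- def validate_host(host, allowed_hosts):
--     """Check if a host is in the allowed list."""
--     exact = set()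
--     suffixes = []
--     for entry in allowed_hosts:
--         if entry.startswith('*.'):
--             suffixes.append(entry[2:])
--         else:
--             exact.add(entry)
--     return host in exact or any(host.endswith(s) for s in suffixes)
-- ===== Notes on version B (the rewrite author's own statement) =====
-- stated objective: alternative
-- what changed: Replaces A's single interleaved scan with early returns by a preprocessing pass that partitions allowed_hosts into a set of exact entries and a list of wildcard suffixes, then a set-membership test plus a separate suffix scan.
import Mathlib
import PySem

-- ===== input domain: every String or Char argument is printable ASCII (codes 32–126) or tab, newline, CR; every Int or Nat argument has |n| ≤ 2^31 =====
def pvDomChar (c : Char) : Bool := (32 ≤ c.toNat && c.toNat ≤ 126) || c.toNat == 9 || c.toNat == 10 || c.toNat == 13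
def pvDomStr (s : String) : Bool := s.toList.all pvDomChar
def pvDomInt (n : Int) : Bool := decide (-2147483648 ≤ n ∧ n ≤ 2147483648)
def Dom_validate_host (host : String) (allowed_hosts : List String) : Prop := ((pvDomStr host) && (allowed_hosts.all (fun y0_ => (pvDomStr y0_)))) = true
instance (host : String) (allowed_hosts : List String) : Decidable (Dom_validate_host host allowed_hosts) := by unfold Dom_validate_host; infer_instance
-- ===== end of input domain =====

-- B partitions allowed_hosts into an exact-match set and a wildcard-suffix list, then tests each separately (alternative decomposition, same cost).

-- ===== PORT A =====
-- literal transliteration of A's single scan with early returns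
def validate_host (host : String) (allowed_hosts : List String) : Bool :=
  match allowed_hosts with
  | [] => false
  | allowed_host :: rest =>
    if PySem.Str.startswith allowed_host "*." then
      if PySem.Str.endswith host (PySem.Str.slice allowed_host (some 2) none) then true
      else validate_host host rest
    else if host == allowed_host then true
    else validate_host host rest

-- ===== PORT B =====
-- partition pass: exact entries into a set, stripped '*.'-suffixes into a list
def vhStep (acc : PySem.Set String × List String) (entry : String) : PySem.Set String × List String :=
  if PySem.Str.startswith entry "*." then
    (acc.1, acc.2 ++ [PySem.Str.slice entry (some 2) none])
  else
    (PySem.Set.add acc.1 entry, acc.2)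

def validate_host_alt (host : String) (allowed_hosts : List String) : Bool :=
  let st := allowed_hosts.foldl vhStep (PySem.Set.empty, [])
  PySem.Set.contains st.1 host || st.2.any (fun s => PySem.Str.endswith host s)

-- ===== PRECONDITION & SPEC =====
def Spec_validate_host (host : String) (allowed_hosts : List String) (out : Bool) : Prop := out = validate_host_alt host allowed_hosts
instance (host : String) (allowed_hosts : List String) (out : Bool) : Decidable (Spec_validate_host host allowed_hosts out) := by unfold Spec_validate_host; infer_instance

-- ===== CLAIM (what is proved, stated in full; the proofs are below) =====
def Claim_equal_validate_host : Prop := ∀ (host : String) (allowed_hosts : List String), Dom_validate_host host allowed_hosts → Spec_validate_host host allowed_hosts (validate_host host allowed_hosts)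

-- ===== LEMMAS AND PROOFS =====

lemma set_contains_add (e : PySem.Set String) (a x : String) :
    PySem.Set.contains (PySem.Set.add e a) x = (PySem.Set.contains e x || x == a) := by
  simp only [PySem.Set.add, PySem.Set.contains]
  by_cases ha : a ∈ e
  · by_cases hx : x = a <;> simp [ha, hx]
  · by_cases hx : x = a <;> simp [ha, hx]

lemma fold_inv (host : String) (l : List String) (e : PySem.Set String) (s : List String) :
    (PySem.Set.contains (l.foldl vhStep (e, s)).1 host
      || (l.foldl vhStep (e, s)).2.any (fun t => PySem.Str.endswith host t))
    = (PySem.Set.contains e host || s.any (fun t => PySem.Str.endswith host t)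
        || validate_host host l) := by
  induction l generalizing e s with
  | nil => simp [validate_host]
  | cons a rest ih =>
    simp only [List.foldl_cons, vhStep]
    by_cases hw : PySem.Str.startswith a "*."
    · rw [if_pos hw, ih]
      simp only [validate_host, if_pos hw]
      by_cases he : PySem.Str.endswith host (PySem.Str.slice a (some 2) none) <;>
        simp [Bool.or_assoc, Bool.or_comm, Bool.or_left_comm]
    · rw [if_neg hw, ih, set_contains_add]
      simp only [validate_host, if_neg hw]
      by_cases hx : host = a
      · simp [hx, Bool.or_comm]
      · have hb : (host == a) = false := beq_eq_false_iff_ne.mpr hx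
        simp [hb, Bool.or_comm]

-- ===== VERDICT (by name: the statement is the Claim_ definition above) =====
theorem validate_host_spec : Claim_equal_validate_host := by
  intro host allowed_hosts _
  unfold Spec_validate_host validate_host_alt
  rw [fold_inv host allowed_hosts PySem.Set.empty []]
  simp [PySem.Set.empty, PySem.Set.contains]
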